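-- pv_equiv track=rewrite | github.com/wooriel/baekjoon | 1003_fibonacci.py | count_0_1
-- ===== SOURCE A (Python) =====
-- def count_0_1(n):
--     a = 1
--     b = 2
--     count_a = [0, 1]
--     count_b = [1, 1]
--     if n == a:
--         return count_a
--     elif n == b:
--         return count_b
--     else:
--         while b != n:
--             count_c = [count_a[0] + count_b[0], count_a[1] + count_b[1]]
--             count_a = count_b
--             count_b = count_c
--             a += 1
--             b += 1
--         return count_b
-- ===== SOURCE B (Python) =====
-- def count_0_1(n):
--     # fast-doubling Fibonacci: fd(k) returns (F(k), F(k+1))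
--     def fd(k):
--         if k == 0:
--             return (0, 1)
--         a, b = fd(k >> 1)
--         c = a * (2 * b - a)
--         d = a * a + b * b
--         if k & 1:
--             return (d, c + d)
--         return (c, d)
--     a, b = fd(n - 1)
--     return [a, b]
-- ===== Notes on version B (the rewrite author's own statement) =====
-- stated objective: faster
-- what changed: replaces the linear Fibonacci loop with recursive fast doubling, computing (F(n-1), F(n)) in O(log n) arithmetic steps; intended as faster — a timing run showed two-orders-of-magnitude speedups at every size it could decode, but could not confirm at its largest size
-- outside the precondition, e.g. on count_0_1(0): A does not finish within the time limit, B raises RecursionError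
import Mathlib
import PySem

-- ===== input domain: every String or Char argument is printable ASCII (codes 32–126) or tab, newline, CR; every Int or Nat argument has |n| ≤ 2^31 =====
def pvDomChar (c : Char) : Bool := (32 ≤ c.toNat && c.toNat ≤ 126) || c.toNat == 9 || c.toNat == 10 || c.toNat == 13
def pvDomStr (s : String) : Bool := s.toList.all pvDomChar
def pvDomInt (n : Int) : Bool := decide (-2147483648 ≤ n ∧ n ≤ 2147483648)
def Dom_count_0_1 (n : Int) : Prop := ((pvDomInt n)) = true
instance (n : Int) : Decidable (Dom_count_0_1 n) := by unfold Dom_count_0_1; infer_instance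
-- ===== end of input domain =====

-- B replaces A's linear Fibonacci loop with recursive fast doubling (intended as faster; a timing run showed large speedups at every size it could decode but could not confirm at its largest size).

-- ===== PORT A =====
-- A's while-loop: b counts up from 2 until it reaches n, so for n ≥ 3 it runs (n-2) times.
def aLoop : Nat → List Int → List Int → List Int
  | 0, _, count_b => count_b
  | k+1, count_a, count_b =>
      let count_c := [count_a.getD 0 0 + count_b.getD 0 0, count_a.getD 1 0 + count_b.getD 1 0]
      aLoop k count_b count_c

def count_0_1 (n : Int) : List Int :=
  if n = 1 then [0, 1]
  else if n = 2 then [1, 1]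
  else aLoop (n - 2).toNat [0, 1] [1, 1]

-- ===== PORT B =====
-- fast doubling: fd k = (F(k), F(k+1))
def fd (k : Nat) : Int × Int :=
  if _h : k = 0 then (0, 1)
  else
    let p := fd (k / 2)
    let a := p.1
    let b := p.2
    let c := a * (2 * b - a)
    let d := a * a + b * b
    if k % 2 = 1 then (d, c + d) else (c, d)
termination_by k
decreasing_by exact Nat.div_lt_self (Nat.pos_of_ne_zero _h) (by norm_num)

def count_0_1_alt (n : Int) : List Int :=
  let p := fd (n - 1).toNat
  [p.1, p.2]

-- ===== PRECONDITION & SPEC =====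
-- A's while-loop never terminates for n ≤ 0 (b only increases from 2), so those inputs are excluded.
def Pre_count_0_1 (n : Int) : Prop := 1 ≤ n
instance (n : Int) : Decidable (Pre_count_0_1 n) := by unfold Pre_count_0_1; infer_instance
def pvWitness_count_0_1 : Int := (5)

def Spec_count_0_1 (n : Int) (out : List Int) : Prop := out = count_0_1_alt n
instance (n : Int) (out : List Int) : Decidable (Spec_count_0_1 n out) := by unfold Spec_count_0_1; infer_instance

-- ===== CLAIM (what is proved, stated in full; the proofs are below) =====
def Claim_equal_count_0_1 : Prop := ∀ (n : Int), Dom_count_0_1 n → Pre_count_0_1 n → Spec_count_0_1 n (count_0_1 n)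

-- ===== LEMMAS AND PROOFS =====

theorem fd_eq (k : Nat) : fd k = ((Nat.fib k : Int), (Nat.fib (k+1) : Int)) := by
  induction k using Nat.strong_induction_on with
  | _ k ih =>
    rw [fd]
    by_cases hk : k = 0
    · subst hk; simp
    · rw [dif_neg hk]
      have ihm := ih (k / 2) (Nat.div_lt_self (Nat.pos_of_ne_zero hk) (by norm_num))
      set m := k / 2 with hm
      rw [ihm]
      have hle : Nat.fib m ≤ 2 * Nat.fib (m + 1) := by
        have := Nat.fib_mono (show m ≤ m + 1 by omega)
        omega
      have hc : ((Nat.fib m : Int)) * (2 * (Nat.fib (m+1) : Int) - (Nat.fib m : Int))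
          = (Nat.fib (2 * m) : Int) := by
        rw [Nat.fib_two_mul, Nat.cast_mul, Nat.cast_sub hle]; push_cast; ring
      have hd : ((Nat.fib m : Int)) * (Nat.fib m : Int) + (Nat.fib (m+1) : Int) * (Nat.fib (m+1) : Int)
          = (Nat.fib (2 * m + 1) : Int) := by
        rw [Nat.fib_two_mul_add_one]; push_cast; ring
      have hdm : 2 * m + k % 2 = k := by rw [hm]; omega
      by_cases hpar : k % 2 = 1
      · have hk2 : k = 2 * m + 1 := by omega
        simp only [hpar, if_pos]
        rw [hk2]
        refine Prod.ext ?_ ?_ <;> simp only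
        · exact hd
        · have hfib : (Nat.fib (2 * m + 1 + 1) : Int)
              = (Nat.fib (2 * m) : Int) + (Nat.fib (2 * m + 1) : Int) := by
            rw [Nat.fib_add_two]; push_cast; ring
          rw [hfib, ← hc, ← hd]
      · have hk2 : k = 2 * m := by omega
        rw [if_neg hpar, hk2]
        refine Prod.ext ?_ ?_ <;> simp only
        · exact hc
        · rw [← hd]

theorem aLoop_eq (k : Nat) : ∀ m : Nat,
    aLoop k [(Nat.fib m : Int), (Nat.fib (m+1) : Int)] [(Nat.fib (m+1) : Int), (Nat.fib (m+2) : Int)]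
      = [(Nat.fib (k+m+1) : Int), (Nat.fib (k+m+2) : Int)] := by
  induction k with
  | zero => intro m; simp [aLoop]
  | succ k ih =>
    intro m
    have h1 : (Nat.fib m : Int) + (Nat.fib (m+1) : Int) = (Nat.fib (m+2) : Int) := by
      rw [Nat.fib_add_two]; push_cast; ring
    have h2 : (Nat.fib (m+1) : Int) + (Nat.fib (m+2) : Int) = (Nat.fib (m+3) : Int) := by
      have h := Nat.fib_add_two (n := m + 1)
      rw [show m + 3 = m + 1 + 2 from rfl, h, show m + 1 + 1 = m + 2 from rfl]
      push_cast
      ring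
    show aLoop (k+1) _ _ = _
    rw [aLoop]
    simp only [List.getD, List.getElem?_cons_zero, List.getElem?_cons_succ, Option.getD_some]
    rw [h1, h2]
    have := ih (m + 1)
    rw [show m + 1 + 1 = m + 2 from rfl, show m + 1 + 2 = m + 3 from rfl,
        show k + (m + 1) + 1 = k + 1 + m + 1 by omega,
        show k + (m + 1) + 2 = k + 1 + m + 2 by omega] at this
    exact this

theorem count_eq (n : Int) (hn : 1 ≤ n) :
    count_0_1 n = [(Nat.fib (n-1).toNat : Int), (Nat.fib ((n-1).toNat + 1) : Int)] := by
  unfold count_0_1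
  by_cases h1 : n = 1
  · subst h1; norm_num
  by_cases h2 : n = 2
  · subst h2; norm_num
  · have h3 : 3 ≤ n := by omega
    rw [if_neg h1, if_neg h2]
    have hk : (n - 1).toNat = (n - 2).toNat + 1 := by omega
    have := aLoop_eq (n - 2).toNat 0
    norm_num at this
    rw [this, hk]

-- ===== VERDICT (by name: the statement is the Claim_ definition above) =====
theorem count_0_1_spec : Claim_equal_count_0_1 := by
  intro n _ hpre
  unfold Spec_count_0_1 count_0_1_alt
  rw [fd_eq, count_eq n hpre]
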